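-- pv_equiv track=rewrite | github.com/hudenise2/ONT_Methylation | v1_methylation_per_CpG/count_doublon_perSeq.py | generate_second_output
-- ===== SOURCE A (Python) =====
-- def generate_second_output(fastq_dic, mod_dic):
--     return_count={x:{} for x in [0,64,128,192]}
--     for seq_name in mod_dic:
--         for dn in mod_dic[seq_name]:
--             for threshold in [0,64,128,192]:
--                 if dn not in return_count[threshold]: return_count[threshold][dn]=[0,0]
--                 count_all= len(fastq_dic[seq_name][dn])
--                 count_mod= len([x for x in mod_dic[seq_name][dn] if int(x) >= threshold])
--                 return_count[threshold][dn]=[return_count[threshold][dn][0]+count_all, return_count[threshold][dn][1]+count_mod]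
--     return return_count
-- ===== SOURCE B (Python) =====
-- def generate_second_output(fastq_dic, mod_dic):
--     d0, d64, d128, d192 = {}, {}, {}, {}
--     for seq_name, dns in mod_dic.items():
--         for dn, vals in dns.items():
--             count_all = len(fastq_dic[seq_name][dn])
--             b0 = b1 = b2 = b3 = 0
--             for s in vals:
--                 v = int(s)
--                 if v >= 192:
--                     b3 += 1
--                 elif v >= 128:
--                     b2 += 1
--                 elif v >= 64:
--                     b1 += 1
--                 elif v >= 0:
--                     b0 += 1
--             c192 = b3
--             c128 = c192 + b2
--             c64 = c128 + b1
--             c0 = c64 + b0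
--             for d, c in ((d0, c0), (d64, c64), (d128, c128), (d192, c192)):
--                 prev = d.get(dn, [0, 0])
--                 d[dn] = [prev[0] + count_all, prev[1] + c]
--     return {0: d0, 64: d64, 128: d128, 192: d192}
-- ===== Notes on version B (the rewrite author's own statement) =====
-- stated objective: alternative
-- what changed: B replaces A's per-threshold rescans (four filter passes over the value list per dn, with repeated nested-dict lookups inside the threshold loop) by one bucketing pass per dn that classifies each value into one of four ranges and derives the four threshold counts as cumulative sums, accumulating into four flat per-threshold dicts instead of re-inserting into a nested dict.
import Mathlib
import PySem

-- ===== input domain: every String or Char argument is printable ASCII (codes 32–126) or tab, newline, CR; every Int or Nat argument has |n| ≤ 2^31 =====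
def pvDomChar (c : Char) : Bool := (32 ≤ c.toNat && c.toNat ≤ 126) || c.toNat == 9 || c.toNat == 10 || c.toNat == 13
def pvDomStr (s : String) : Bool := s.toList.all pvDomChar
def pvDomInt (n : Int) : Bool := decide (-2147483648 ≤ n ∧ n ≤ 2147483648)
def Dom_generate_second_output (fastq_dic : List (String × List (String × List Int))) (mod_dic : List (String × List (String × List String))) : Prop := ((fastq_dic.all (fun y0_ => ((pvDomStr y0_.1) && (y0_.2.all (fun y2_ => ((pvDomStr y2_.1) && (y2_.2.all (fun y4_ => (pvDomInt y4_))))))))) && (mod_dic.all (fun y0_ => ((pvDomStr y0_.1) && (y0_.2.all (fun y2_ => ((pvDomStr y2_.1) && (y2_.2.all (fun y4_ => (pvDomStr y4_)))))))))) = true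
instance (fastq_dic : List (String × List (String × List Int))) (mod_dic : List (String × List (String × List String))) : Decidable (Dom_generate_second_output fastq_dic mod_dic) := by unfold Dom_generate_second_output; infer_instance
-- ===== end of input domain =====

-- B replaces A's four filter passes per dn by one bucketing pass with cumulative sums,
-- kept in four flat per-threshold dicts (alternative decomposition; speed not measured).

-- ===== PORT A =====
-- count_all = len(fastq_dic[seq_name][dn]); the getD defaults are only reached where Python
-- raises KeyError, which Pre_ excludes (likewise the getD 0 after int(x), ValueError).
def pvACountAll (fastq_dic : List (String × List (String × List Int))) (seq_name dn : String) : Int :=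
  ((PySem.Dict.mk ((PySem.Dict.mk fastq_dic).getD seq_name [])).getD dn []).length

-- body of A's innermost `for threshold in [0,64,128,192]` loop
def pvAStep (fastq_dic : List (String × List (String × List Int))) (seq_name : String)
    (dp : String × List String)
    (rc : PySem.Dict Int (PySem.Dict String (List Int))) (threshold : Int) :
    PySem.Dict Int (PySem.Dict String (List Int)) :=
  let td := rc.getD threshold PySem.Dict.empty
  let td := if td.contains dp.1 then td else td.insert dp.1 [0, 0]
  let count_all : Int := pvACountAll fastq_dic seq_name dp.1
  let count_mod : Int := (dp.2.filter (fun x => threshold ≤ (PySem.Int.ofStr? x).getD 0)).length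
  let prev := td.getD dp.1 [0, 0]
  rc.insert threshold (td.insert dp.1
    [(PySem.List.pyGet? prev 0).getD 0 + count_all, (PySem.List.pyGet? prev 1).getD 0 + count_mod])

-- A's `for dn in mod_dic[seq_name]` body / `for seq_name in mod_dic` body
def pvAInner (fastq_dic : List (String × List (String × List Int))) (seq_name : String)
    (rc : PySem.Dict Int (PySem.Dict String (List Int))) (dp : String × List String) :
    PySem.Dict Int (PySem.Dict String (List Int)) :=
  ([0, 64, 128, 192] : List Int).foldl (pvAStep fastq_dic seq_name dp) rc

def pvAOuter (fastq_dic : List (String × List (String × List Int)))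
    (rc : PySem.Dict Int (PySem.Dict String (List Int)))
    (sp : String × List (String × List String)) :
    PySem.Dict Int (PySem.Dict String (List Int)) :=
  sp.2.foldl (pvAInner fastq_dic sp.1) rc

def generate_second_output (fastq_dic : List (String × List (String × List Int))) (mod_dic : List (String × List (String × List String))) : List (Int × List (String × List Int)) :=
  ((mod_dic.foldl (pvAOuter fastq_dic)
    (([0, 64, 128, 192] : List Int).foldl (fun d x => d.insert x PySem.Dict.empty)
      PySem.Dict.empty)).items).map (fun p => (p.1, p.2.items))

-- ===== PORT B =====
-- count_all = len(fastq_dic[seq_name][dn]) in B (computed once per dn); getD defaults as in A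
def pvBCountAll (fastq_dic : List (String × List (String × List Int))) (seq_name dn : String) : Int :=
  ((PySem.Dict.mk ((PySem.Dict.mk fastq_dic).getD seq_name [])).getD dn []).length

-- one bucketing pass over the values: counts in [0,64), [64,128), [128,192), [192,∞)
def pvBucket (vals : List String) : Int × Int × Int × Int :=
  vals.foldl (fun st s =>
    let v := (PySem.Int.ofStr? s).getD 0
    if 192 ≤ v then (st.1, st.2.1, st.2.2.1, st.2.2.2 + 1)
    else if 128 ≤ v then (st.1, st.2.1, st.2.2.1 + 1, st.2.2.2)
    else if 64 ≤ v then (st.1, st.2.1 + 1, st.2.2.1, st.2.2.2)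
    else if 0 ≤ v then (st.1 + 1, st.2.1, st.2.2.1, st.2.2.2)
    else st) (0, 0, 0, 0)

-- the `for d, c in ((d0,c0),…)` body
def pvBUpd (d : PySem.Dict String (List Int)) (dn : String) (count_all c : Int) :
    PySem.Dict String (List Int) :=
  let prev := d.getD dn [0, 0]
  d.insert dn [(PySem.List.pyGet? prev 0).getD 0 + count_all, (PySem.List.pyGet? prev 1).getD 0 + c]

-- body of B's `for dn, vals in dns.items()` loop, over the four-dict state
def pvBStep (fastq_dic : List (String × List (String × List Int))) (seq_name : String)
    (st : PySem.Dict String (List Int) × PySem.Dict String (List Int) ×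
          PySem.Dict String (List Int) × PySem.Dict String (List Int))
    (dp : String × List String) :
    PySem.Dict String (List Int) × PySem.Dict String (List Int) ×
    PySem.Dict String (List Int) × PySem.Dict String (List Int) :=
  let count_all : Int := pvBCountAll fastq_dic seq_name dp.1
  let b := pvBucket dp.2
  let c192 := b.2.2.2
  let c128 := c192 + b.2.2.1
  let c64 := c128 + b.2.1
  let c0 := c64 + b.1
  (pvBUpd st.1 dp.1 count_all c0, pvBUpd st.2.1 dp.1 count_all c64,
   pvBUpd st.2.2.1 dp.1 count_all c128, pvBUpd st.2.2.2 dp.1 count_all c192)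

def pvBOuter (fastq_dic : List (String × List (String × List Int)))
    (st : PySem.Dict String (List Int) × PySem.Dict String (List Int) ×
          PySem.Dict String (List Int) × PySem.Dict String (List Int))
    (sp : String × List (String × List String)) :
    PySem.Dict String (List Int) × PySem.Dict String (List Int) ×
    PySem.Dict String (List Int) × PySem.Dict String (List Int) :=
  sp.2.foldl (pvBStep fastq_dic sp.1) st

-- return {0: d0, 64: d64, 128: d128, 192: d192}
def pvBFinish (st : PySem.Dict String (List Int) × PySem.Dict String (List Int) ×
    PySem.Dict String (List Int) × PySem.Dict String (List Int)) :
    List (Int × List (String × List Int)) :=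
  [(0, st.1.items), (64, st.2.1.items), (128, st.2.2.1.items), (192, st.2.2.2.items)]

def generate_second_output_alt (fastq_dic : List (String × List (String × List Int))) (mod_dic : List (String × List (String × List String))) : List (Int × List (String × List Int)) :=
  pvBFinish (mod_dic.foldl (pvBOuter fastq_dic)
    (PySem.Dict.mk [], PySem.Dict.mk [], PySem.Dict.mk [], PySem.Dict.mk []))

-- ===== PRECONDITION & SPEC =====
-- Pre_ excludes exactly the inputs where Python A raises: a dn of mod_dic whose seq_name/dn is
-- missing from fastq_dic (KeyError) or a value string int() rejects (ValueError); and, because the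
-- association lists stand for Python dicts, lists with duplicate keys, which represent no dict input.
def Pre_generate_second_output (fastq_dic : List (String × List (String × List Int))) (mod_dic : List (String × List (String × List String))) : Prop :=
  (fastq_dic.map Prod.fst).Nodup ∧ (∀ p ∈ fastq_dic, (p.2.map Prod.fst).Nodup) ∧
  (mod_dic.map Prod.fst).Nodup ∧
  ∀ sp ∈ mod_dic, (sp.2.map Prod.fst).Nodup ∧
    ∀ dp ∈ sp.2,
      (((PySem.Dict.mk fastq_dic).get? sp.1).bind
        (fun fd => (PySem.Dict.mk fd).get? dp.1)).isSome ∧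
      ∀ s ∈ dp.2, (PySem.Int.ofStr? s).isSome
instance (fastq_dic : List (String × List (String × List Int))) (mod_dic : List (String × List (String × List String))) : Decidable (Pre_generate_second_output fastq_dic mod_dic) := by unfold Pre_generate_second_output; infer_instance

def pvWitness_generate_second_output : (List (String × List (String × List Int))) × (List (String × List (String × List String))) :=
  ([("s", [("d", [1, 2])])], [("s", [("d", ["200", "5"])])])

def Spec_generate_second_output (fastq_dic : List (String × List (String × List Int))) (mod_dic : List (String × List (String × List String))) (out : List (Int × List (String × List Int))) : Prop := out = generate_second_output_alt fastq_dic mod_dic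
instance (fastq_dic : List (String × List (String × List Int))) (mod_dic : List (String × List (String × List String))) (out : List (Int × List (String × List Int))) : Decidable (Spec_generate_second_output fastq_dic mod_dic out) := by unfold Spec_generate_second_output; infer_instance

-- ===== CLAIM (what is proved, stated in full; the proofs are below) =====
def Claim_equal_generate_second_output : Prop := ∀ (fastq_dic : List (String × List (String × List Int))) (mod_dic : List (String × List (String × List String))), Dom_generate_second_output fastq_dic mod_dic → Pre_generate_second_output fastq_dic mod_dic → Spec_generate_second_output fastq_dic mod_dic (generate_second_output fastq_dic mod_dic)

-- ===== LEMMAS AND PROOFS =====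

-- count of values ≥ t (A's count_mod for threshold t)
def pvCnt (t : Int) (vals : List String) : Int :=
  ((vals.filter (fun x => t ≤ (PySem.Int.ofStr? x).getD 0)).length : Int)

-- B's four-dict state rendered as A's nested dict
def pvMk4 (st : PySem.Dict String (List Int) × PySem.Dict String (List Int) ×
    PySem.Dict String (List Int) × PySem.Dict String (List Int)) :
    PySem.Dict Int (PySem.Dict String (List Int)) :=
  PySem.Dict.mk [(0, st.1), (64, st.2.1), (128, st.2.2.1), (192, st.2.2.2)]

-- A's update of one threshold-dict
def pvAUpd (d : PySem.Dict String (List Int)) (k : String) (ca cm : Int) :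
    PySem.Dict String (List Int) :=
  let td := if d.contains k then d else d.insert k [0, 0]
  let prev := td.getD k [0, 0]
  td.insert k [(PySem.List.pyGet? prev 0).getD 0 + ca, (PySem.List.pyGet? prev 1).getD 0 + cm]

theorem pvInsertAbsorb (d : PySem.Dict String (List Int)) (k : String)
    (hc : d.contains k = false) (v w : List Int) :
    (d.insert k w).insert k v = d.insert k v := by
  apply PySem.Dict.ext
  rw [PySem.Dict.items_insert_of_contains _ v (PySem.Dict.contains_insert_self d k w),
      PySem.Dict.items_insert_of_not_contains _ w hc,
      PySem.Dict.items_insert_of_not_contains _ v hc,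
      List.map_append]
  have hk : ∀ p ∈ d.items, (p.1 == k) = false := by
    intro p hp
    rw [beq_eq_false_iff_ne]
    intro h1
    have : d.contains k = true :=
      (PySem.Dict.contains_iff_mem_keys d k).mpr (h1 ▸ PySem.Dict.mem_keys_of_mem_items d hp)
    rw [this] at hc
    cases hc
  have h1 : d.items.map (fun p => if (p.1 == k) = true then (k, v) else p) = d.items := by
    conv_rhs => rw [← List.map_id d.items]
    exact List.map_congr_left (fun p hp => by simp [hk p hp])
  rw [h1]
  simp

theorem pvAUpd_eq (d : PySem.Dict String (List Int)) (k : String) (ca cm : Int) :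
    pvAUpd d k ca cm = pvBUpd d k ca cm := by
  by_cases hc : d.contains k = true
  · simp [pvAUpd, pvBUpd, hc]
  · have hc' : d.contains k = false := by simpa using hc
    simp [pvAUpd, pvBUpd, hc', PySem.Dict.getD_insert_self,
      PySem.Dict.getD_of_not_contains d [0, 0] hc', pvInsertAbsorb d k hc']

-- one pvAStep on the literal four-entry dict updates exactly one slot
theorem pvAStep_mk4_0 (f : List (String × List (String × List Int))) (sq : String)
    (dp : String × List String) (a b c e : PySem.Dict String (List Int)) :
    pvAStep f sq dp (PySem.Dict.mk [(0, a), (64, b), (128, c), (192, e)]) 0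
      = PySem.Dict.mk [(0, pvAUpd a dp.1 (pvACountAll f sq dp.1) (pvCnt 0 dp.2)),
          (64, b), (128, c), (192, e)] := by
  apply PySem.Dict.ext
  simp [pvAStep, pvAUpd, pvCnt, PySem.Dict.getD_eq_get?_getD, PySem.Dict.get?_mk_cons,
    PySem.Dict.items_insert_of_contains]

theorem pvAStep_mk4_64 (f : List (String × List (String × List Int))) (sq : String)
    (dp : String × List String) (a b c e : PySem.Dict String (List Int)) :
    pvAStep f sq dp (PySem.Dict.mk [(0, a), (64, b), (128, c), (192, e)]) 64
      = PySem.Dict.mk [(0, a), (64, pvAUpd b dp.1 (pvACountAll f sq dp.1) (pvCnt 64 dp.2)),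
          (128, c), (192, e)] := by
  apply PySem.Dict.ext
  simp [pvAStep, pvAUpd, pvCnt, PySem.Dict.getD_eq_get?_getD, PySem.Dict.get?_mk_cons,
    PySem.Dict.items_insert_of_contains]

theorem pvAStep_mk4_128 (f : List (String × List (String × List Int))) (sq : String)
    (dp : String × List String) (a b c e : PySem.Dict String (List Int)) :
    pvAStep f sq dp (PySem.Dict.mk [(0, a), (64, b), (128, c), (192, e)]) 128
      = PySem.Dict.mk [(0, a), (64, b),
          (128, pvAUpd c dp.1 (pvACountAll f sq dp.1) (pvCnt 128 dp.2)), (192, e)] := by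
  apply PySem.Dict.ext
  simp [pvAStep, pvAUpd, pvCnt, PySem.Dict.getD_eq_get?_getD, PySem.Dict.get?_mk_cons,
    PySem.Dict.items_insert_of_contains]

theorem pvAStep_mk4_192 (f : List (String × List (String × List Int))) (sq : String)
    (dp : String × List String) (a b c e : PySem.Dict String (List Int)) :
    pvAStep f sq dp (PySem.Dict.mk [(0, a), (64, b), (128, c), (192, e)]) 192
      = PySem.Dict.mk [(0, a), (64, b), (128, c),
          (192, pvAUpd e dp.1 (pvACountAll f sq dp.1) (pvCnt 192 dp.2))] := by
  apply PySem.Dict.ext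
  simp [pvAStep, pvAUpd, pvCnt, PySem.Dict.getD_eq_get?_getD, PySem.Dict.get?_mk_cons,
    PySem.Dict.items_insert_of_contains]

-- the bucketing fold computes the four interval counts
theorem pvBucket_go (vals : List String) : ∀ (a0 a1 a2 a3 : Int),
    vals.foldl (fun st s =>
      let v := (PySem.Int.ofStr? s).getD 0
      if 192 ≤ v then (st.1, st.2.1, st.2.2.1, st.2.2.2 + 1)
      else if 128 ≤ v then (st.1, st.2.1, st.2.2.1 + 1, st.2.2.2)
      else if 64 ≤ v then (st.1, st.2.1 + 1, st.2.2.1, st.2.2.2)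
      else if 0 ≤ v then (st.1 + 1, st.2.1, st.2.2.1, st.2.2.2)
      else st) (a0, a1, a2, a3)
    = (a0 + (pvCnt 0 vals - pvCnt 64 vals), a1 + (pvCnt 64 vals - pvCnt 128 vals),
       a2 + (pvCnt 128 vals - pvCnt 192 vals), a3 + pvCnt 192 vals) := by
  induction vals with
  | nil => intro a0 a1 a2 a3; simp [pvCnt]
  | cons s rest ih =>
    intro a0 a1 a2 a3
    rw [List.foldl_cons]
    have hcnt : ∀ t : Int, pvCnt t (s :: rest)
        = pvCnt t rest + (if t ≤ (PySem.Int.ofStr? s).getD 0 then 1 else 0) := by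
      intro t
      by_cases h : t ≤ (PySem.Int.ofStr? s).getD 0 <;> simp [pvCnt, h]
    by_cases h192 : (192 : Int) ≤ (PySem.Int.ofStr? s).getD 0
    · have h128 : (128 : Int) ≤ (PySem.Int.ofStr? s).getD 0 := by omega
      have h64 : (64 : Int) ≤ (PySem.Int.ofStr? s).getD 0 := by omega
      have h0 : (0 : Int) ≤ (PySem.Int.ofStr? s).getD 0 := by omega
      simp only [if_pos h192]
      rw [ih]
      simp only [hcnt, if_pos h0, if_pos h64, if_pos h128, if_pos h192, Prod.mk.injEq]
      refine ⟨by omega, by omega, by omega, by omega⟩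
    · by_cases h128 : (128 : Int) ≤ (PySem.Int.ofStr? s).getD 0
      · have h64 : (64 : Int) ≤ (PySem.Int.ofStr? s).getD 0 := by omega
        have h0 : (0 : Int) ≤ (PySem.Int.ofStr? s).getD 0 := by omega
        simp only [if_neg h192, if_pos h128]
        rw [ih]
        simp only [hcnt, if_pos h0, if_pos h64, if_pos h128, if_neg h192, Prod.mk.injEq]
        refine ⟨by omega, by omega, by omega, by omega⟩
      · by_cases h64 : (64 : Int) ≤ (PySem.Int.ofStr? s).getD 0
        · have h0 : (0 : Int) ≤ (PySem.Int.ofStr? s).getD 0 := by omega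
          simp only [if_neg h192, if_neg h128, if_pos h64]
          rw [ih]
          simp only [hcnt, if_pos h0, if_pos h64, if_neg h128, if_neg h192, Prod.mk.injEq]
          refine ⟨by omega, by omega, by omega, by omega⟩
        · by_cases h0 : (0 : Int) ≤ (PySem.Int.ofStr? s).getD 0
          · simp only [if_neg h192, if_neg h128, if_neg h64, if_pos h0]
            rw [ih]
            simp only [hcnt, if_pos h0, if_neg h64, if_neg h128, if_neg h192, Prod.mk.injEq]
            refine ⟨by omega, by omega, by omega, by omega⟩
          · simp only [if_neg h192, if_neg h128, if_neg h64, if_neg h0]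
            rw [ih]
            simp only [hcnt, if_neg h0, if_neg h64, if_neg h128, if_neg h192, Prod.mk.injEq]
            refine ⟨by omega, by omega, by omega, by omega⟩

theorem pvBucket_eq (vals : List String) :
    pvBucket vals = (pvCnt 0 vals - pvCnt 64 vals, pvCnt 64 vals - pvCnt 128 vals,
      pvCnt 128 vals - pvCnt 192 vals, pvCnt 192 vals) := by
  unfold pvBucket
  rw [pvBucket_go]
  simp

theorem pvBStep_eq (f : List (String × List (String × List Int))) (sq : String)
    (st : PySem.Dict String (List Int) × PySem.Dict String (List Int) ×
      PySem.Dict String (List Int) × PySem.Dict String (List Int))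
    (dp : String × List String) :
    pvBStep f sq st dp
      = (pvBUpd st.1 dp.1 (pvACountAll f sq dp.1) (pvCnt 0 dp.2),
         pvBUpd st.2.1 dp.1 (pvACountAll f sq dp.1) (pvCnt 64 dp.2),
         pvBUpd st.2.2.1 dp.1 (pvACountAll f sq dp.1) (pvCnt 128 dp.2),
         pvBUpd st.2.2.2 dp.1 (pvACountAll f sq dp.1) (pvCnt 192 dp.2)) := by
  simp only [pvBStep, pvBucket_eq, show pvBCountAll = pvACountAll from rfl]
  refine congrArg₂ _ ?_ (congrArg₂ _ ?_ (congrArg₂ _ ?_ ?_)) <;>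
    exact congrArg (pvBUpd _ _ _) (by omega)

-- one dn processed: A's threshold loop = B's step, through pvMk4
theorem pvStep_eq (f : List (String × List (String × List Int))) (sq : String)
    (st : PySem.Dict String (List Int) × PySem.Dict String (List Int) ×
      PySem.Dict String (List Int) × PySem.Dict String (List Int))
    (dp : String × List String) :
    pvAInner f sq (pvMk4 st) dp = pvMk4 (pvBStep f sq st dp) := by
  obtain ⟨a, b, c, e⟩ := st
  unfold pvAInner pvMk4
  simp only [List.foldl_cons, List.foldl_nil]
  rw [pvAStep_mk4_0, pvAStep_mk4_64, pvAStep_mk4_128, pvAStep_mk4_192, pvBStep_eq]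
  simp [pvAUpd_eq]

theorem pvInner_eq (f : List (String × List (String × List Int))) (sq : String)
    (l : List (String × List String)) :
    ∀ (st : PySem.Dict String (List Int) × PySem.Dict String (List Int) ×
      PySem.Dict String (List Int) × PySem.Dict String (List Int)),
    l.foldl (pvAInner f sq) (pvMk4 st) = pvMk4 (l.foldl (pvBStep f sq) st) := by
  induction l with
  | nil => intro st; simp
  | cons dp rest ih =>
    intro st
    simp only [List.foldl_cons]
    rw [pvStep_eq]
    exact ih _

theorem pvAOuter_eq (f : List (String × List (String × List Int)))
    (st : PySem.Dict String (List Int) × PySem.Dict String (List Int) ×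
      PySem.Dict String (List Int) × PySem.Dict String (List Int))
    (sp : String × List (String × List String)) :
    pvAOuter f (pvMk4 st) sp = pvMk4 (pvBOuter f st sp) := by
  unfold pvAOuter pvBOuter
  exact pvInner_eq f sp.1 sp.2 st

theorem pvMain_eq (f : List (String × List (String × List Int)))
    (m : List (String × List (String × List String))) :
    ∀ (st : PySem.Dict String (List Int) × PySem.Dict String (List Int) ×
      PySem.Dict String (List Int) × PySem.Dict String (List Int)),
    m.foldl (pvAOuter f) (pvMk4 st) = pvMk4 (m.foldl (pvBOuter f) st) := by
  induction m with
  | nil => intro st; simp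
  | cons sp rest ih =>
    intro st
    simp only [List.foldl_cons]
    rw [pvAOuter_eq]
    exact ih _

-- ===== VERDICT (by name: the statement is the Claim_ definition above) =====
theorem generate_second_output_spec : Claim_equal_generate_second_output := by
  intro fastq_dic mod_dic _ _
  unfold Spec_generate_second_output generate_second_output generate_second_output_alt
  have h0 : (([0, 64, 128, 192] : List Int).foldl (fun d x => d.insert x PySem.Dict.empty)
      PySem.Dict.empty)
      = pvMk4 (PySem.Dict.mk [], PySem.Dict.mk [], PySem.Dict.mk [], PySem.Dict.mk []) := by
    decide
  rw [h0, pvMain_eq]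
  rfl
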